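-- pv_equiv track=rewrite | github.com/matvey83/softChord | pyjamas-0.7/library/pyjamas/chart/GChartUtil.py | htmlHeight
-- ===== SOURCE A (Python) =====
-- def indexOfBr(s, iStart=0):
--     BR1 = "<br>"
--     BR2 = "<BR>"
--     BR3 = "<li>";  # recognize <li> as a break.
--     BR4 = "<LI>"
--     BR5 = "<tr>";  # recognize <tr> as a break.
--     BR6 = "<TR>"
--     iBr1 = s.find(BR1, iStart)
--     iBr2 = s.find(BR2, iStart)
--     iBr3 = s.find(BR3, iStart)
--     iBr4 = s.find(BR4, iStart)
--     iBr5 = s.find(BR5, iStart)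
--     iBr6 = s.find(BR6, iStart)
--     result1 = 0
--     result2 = 0
--     result3 = 0
--     result = 0
--
--     if -1 == iBr1:
--         result1 = iBr2
--
--     elif -1 == iBr2:
--         result1 = iBr1
--
--     else:
--         result1 = min(iBr1, iBr2)
--
--
--     if -1 == iBr3:
--         result2 = iBr4
--
--     elif -1 == iBr4:
--         result2 = iBr3
--
--     else:
--         result2 = min(iBr3, iBr4)
--
--
--     if -1 == iBr5:
--         result3 = iBr6
--
--     elif -1 == iBr6:
--         result3 = iBr5
--
--     else:
--         result3 = min(iBr5, iBr6)
--
--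
--
--
--     if -1 == result1:
--         result = result2
--
--     elif -1 == result2:
--         result = result1
--
--     else:
--         result = min(result1, result2)
--
--
--
--     if -1 == result:
--         result = result3
--
--     elif -1 != result3:
--         result = min(result, result3)
--
--
--
--     return result
--
-- def htmlHeight(s):
--     BR_LEN = len("<br>")
--     iBr = 0
--     result = 1
--     if None != s:
--         iBr = indexOfBr(s)
--         while iBr != -1:
--             result += 1
--             iBr = indexOfBr(s, iBr+BR_LEN)
--
--     return result
-- ===== SOURCE B (Python) =====
-- def htmlHeight(s):
--     if s is None:
--         return 1
--     tokens = ("<br>", "<BR>", "<li>", "<LI>", "<tr>", "<TR>")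
--     count = 0
--     i = 0
--     n = len(s)
--     while i < n:
--         if s[i:i+4] in tokens:
--             count += 1
--             i += 4
--         else:
--             i += 1
--     return count + 1
-- ===== Notes on version B (the rewrite author's own statement) =====
-- stated objective: simpler
-- what changed: A repeatedly restarts six separate find() searches plus a min-combination cascade to locate each next break token; B makes one left-to-right sliding-window pass testing the 4-char window at each index against the token tuple.
import Mathlib
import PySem

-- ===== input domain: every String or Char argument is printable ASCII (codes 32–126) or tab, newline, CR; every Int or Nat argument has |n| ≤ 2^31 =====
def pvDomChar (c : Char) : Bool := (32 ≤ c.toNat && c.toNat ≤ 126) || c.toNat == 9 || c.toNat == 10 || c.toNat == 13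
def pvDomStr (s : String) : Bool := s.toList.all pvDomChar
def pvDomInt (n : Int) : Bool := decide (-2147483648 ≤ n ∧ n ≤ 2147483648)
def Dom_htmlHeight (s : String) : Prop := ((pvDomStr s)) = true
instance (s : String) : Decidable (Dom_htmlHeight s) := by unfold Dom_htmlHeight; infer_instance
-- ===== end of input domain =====

-- B replaces A's repeated six-find-plus-min leftmost search by one sliding-window pass (objective: simpler, one scan instead of restarted searches).

-- ===== PORT A =====
-- literal port of indexOfBr(s, iStart): six find calls, then the pairwise min-or-(-1) combinations in A's branch order
def indexOfBr (s : String) (iStart : Int) : Int :=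
  let iBr1 := PySem.Str.findFrom s "<br>" iStart none
  let iBr2 := PySem.Str.findFrom s "<BR>" iStart none
  let iBr3 := PySem.Str.findFrom s "<li>" iStart none
  let iBr4 := PySem.Str.findFrom s "<LI>" iStart none
  let iBr5 := PySem.Str.findFrom s "<tr>" iStart none
  let iBr6 := PySem.Str.findFrom s "<TR>" iStart none
  let result1 := if -1 = iBr1 then iBr2 else if -1 = iBr2 then iBr1 else min iBr1 iBr2
  let result2 := if -1 = iBr3 then iBr4 else if -1 = iBr4 then iBr3 else min iBr3 iBr4
  let result3 := if -1 = iBr5 then iBr6 else if -1 = iBr6 then iBr5 else min iBr5 iBr6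
  let result := if -1 = result1 then result2 else if -1 = result2 then result1 else min result1 result2
  let result := if -1 = result then result3 else if -1 ≠ result3 then min result result3 else result
  result

-- A's 'while iBr != -1' loop; the fuel only bounds the iteration count (proved sufficient below), BR_LEN = 4
def htmlLoop (s : String) (iBr : Int) (result : Int) : Nat → Int
  | 0 => result
  | fuel + 1 => if iBr ≠ -1 then htmlLoop s (indexOfBr s (iBr + 4)) (result + 1) fuel else result

-- 's is not None' always holds for a String argument, so the guard is always taken
def htmlHeight (s : String) : Int :=
  htmlLoop s (indexOfBr s 0) 1 (s.toList.length + 1)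

-- ===== PORT B =====
-- the tuple of the six break tokens, as 4-char lists
def pvTokens : List (List Char) := [['<','b','r','>'], ['<','B','R','>'], ['<','l','i','>'], ['<','L','I','>'], ['<','t','r','>'], ['<','T','R','>']]

-- Source B's index walk: the 4-char window s[i:i+4] is the first four remaining chars; hit → skip 4, miss → skip 1
def scanB : List Char → Int
  | c0 :: c1 :: c2 :: c3 :: rest =>
      if [c0, c1, c2, c3] ∈ pvTokens then 1 + scanB rest
      else scanB (c1 :: c2 :: c3 :: rest)
  | _ => 0

def htmlHeight_alt (s : String) : Int :=
  scanB s.toList + 1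

-- ===== PRECONDITION & SPEC =====
def Spec_htmlHeight (s : String) (out : Int) : Prop := out = htmlHeight_alt s
instance (s : String) (out : Int) : Decidable (Spec_htmlHeight s out) := by unfold Spec_htmlHeight; infer_instance

-- ===== CLAIM (what is proved, stated in full; the proofs are below) =====
def Claim_equal_htmlHeight : Prop := ∀ (s : String), Dom_htmlHeight s → Spec_htmlHeight s (htmlHeight s)

-- ===== LEMMAS AND PROOFS =====

-- a break token starts at the head of l
def tokAt (l : List Char) : Bool := pvTokens.any (fun t => t.isPrefixOf l)

theorem tokAt_iff (l : List Char) : tokAt l = true ↔ ∃ t ∈ pvTokens, t <+: l := by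
  simp [tokAt, List.any_eq_true, List.isPrefixOf_iff_prefix]

theorem window_mem_iff (c0 c1 c2 c3 : Char) (rest : List Char) :
    ([c0, c1, c2, c3] ∈ pvTokens) ↔ tokAt (c0 :: c1 :: c2 :: c3 :: rest) = true := by
  constructor
  · intro h
    simp only [tokAt, pvTokens, List.any_eq_true]
    exact ⟨[c0, c1, c2, c3], h, List.isPrefixOf_iff_prefix.mpr (List.prefix_cons_iff.mpr (Or.inr ⟨_, rfl, by simp⟩))⟩
  · intro h
    obtain ⟨t, ht, hp⟩ := (tokAt_iff _).mp h
    have h4 : t.length = 4 := by fin_cases ht <;> rfl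
    have : t = [c0, c1, c2, c3] := by
      obtain ⟨u, hu⟩ := hp
      match t, h4 with
      | [a, b, c, d], _ =>
        have := congrArg (List.take 4) hu.symm
        simp at this
        simp [this]
    exact this ▸ ht

theorem tokAt_short (l : List Char) (h : l.length < 4) : tokAt l = false := by
  rw [← Bool.not_eq_true]
  intro hm
  obtain ⟨t, ht, hp⟩ := (tokAt_iff l).mp hm
  have h4 : t.length = 4 := by
    fin_cases ht <;> rfl
  have := hp.length_le
  omega

theorem scanB_cons (c : Char) (t : List Char) :
    scanB (c :: t) = if tokAt (c :: t) then 1 + scanB ((c :: t).drop 4) else scanB t := by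
  match t with
  | c1 :: c2 :: c3 :: rest =>
      rw [show scanB (c :: c1 :: c2 :: c3 :: rest) =
          (if [c, c1, c2, c3] ∈ pvTokens then 1 + scanB rest else scanB (c1 :: c2 :: c3 :: rest)) from rfl]
      by_cases h : tokAt (c :: c1 :: c2 :: c3 :: rest) = true
      · rw [if_pos ((window_mem_iff c c1 c2 c3 rest).mpr h), if_pos h]
        rfl
      · rw [if_neg (fun hm => h ((window_mem_iff c c1 c2 c3 rest).mp hm)), if_neg (by simpa using h)]
  | [] =>
      rw [if_neg (by simp [tokAt_short (c :: ([] : List Char)) (by simp)])]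
      rfl
  | [c1] =>
      rw [if_neg (by simp [tokAt_short [c, c1] (by simp)])]
      rfl
  | [c1, c2] =>
      rw [if_neg (by simp [tokAt_short [c, c1, c2] (by simp)])]
      rfl

theorem scanB_no_match (l : List Char) (h : ∀ j, tokAt (l.drop j) = false) : scanB l = 0 := by
  induction l with
  | nil => rfl
  | cons c t ih =>
      rw [scanB_cons, if_neg (by simpa using h 0)]
      exact ih (fun j => by simpa using h (j + 1))

theorem scanB_first (j : Nat) (l : List Char) (hj : tokAt (l.drop j) = true)
    (hmin : ∀ i, i < j → tokAt (l.drop i) = false) :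
    scanB l = 1 + scanB (l.drop (j + 4)) := by
  induction j generalizing l with
  | zero =>
      match l with
      | [] => simp at hj; exact absurd hj (by decide)
      | c :: t =>
          rw [scanB_cons, if_pos (by simpa using hj)]
  | succ j ih =>
      match l with
      | [] => rw [List.drop_nil] at hj; exact absurd hj (by decide)
      | c :: t =>
          rw [scanB_cons, if_neg (by simpa using hmin 0 (Nat.succ_pos _))]
          have h1 : tokAt (t.drop j) = true := by simpa using hj
          have h2 : ∀ i, i < j → tokAt (t.drop i) = false := fun i hi => by
            simpa using hmin (i + 1) (by omega)
          rw [ih t h1 h2]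
          rfl

-- min-or-(-1) combination invariant
def TokQ (l : List Char) (k : Nat) (ts : List (List Char)) (x : Int) : Prop :=
  (x = -1 ∧ ∀ t ∈ ts, ∀ j, k ≤ j → ¬ t <+: l.drop j)
  ∨ (∃ j : Nat, x = ↑j ∧ k ≤ j ∧ (∃ t ∈ ts, t <+: l.drop j) ∧
      ∀ i, k ≤ i → i < j → ∀ t ∈ ts, ¬ t <+: l.drop i)

theorem TokQ_comb (l : List Char) (k : Nat) (ts us : List (List Char)) (x y : Int)
    (hx : TokQ l k ts x) (hy : TokQ l k us y) :
    TokQ l k (ts ++ us) (if -1 = x then y else if -1 = y then x else min x y) := by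
  have hcast : ∀ (n : Nat), ¬ (-1 : Int) = ↑n := by intro n h; omega
  rcases hx with ⟨hx1, hxno⟩ | ⟨j, hxj, hkj, hocc, hmin⟩ <;>
    rcases hy with ⟨hy1, hyno⟩ | ⟨j', hyj, hkj', hocc', hmin'⟩
  · left
    subst hx1; subst hy1
    refine ⟨by simp, ?_⟩
    intro t ht i hki
    rcases List.mem_append.mp ht with h | h
    · exact hxno t h i hki
    · exact hyno t h i hki
  · right
    subst hx1; subst hyj
    refine ⟨j', by simp, hkj', ?_, ?_⟩
    · obtain ⟨t, ht, hp⟩ := hocc'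
      exact ⟨t, List.mem_append.mpr (Or.inr ht), hp⟩
    · intro i hki hij t ht
      rcases List.mem_append.mp ht with h | h
      · exact hxno t h i hki
      · exact hmin' i hki hij t h
  · right
    subst hxj; subst hy1
    refine ⟨j, by simp [hcast j], hkj, ?_, ?_⟩
    · obtain ⟨t, ht, hp⟩ := hocc
      exact ⟨t, List.mem_append.mpr (Or.inl ht), hp⟩
    · intro i hki hij t ht
      rcases List.mem_append.mp ht with h | h
      · exact hmin i hki hij t h
      · exact hyno t h i hki
  · right
    subst hxj; subst hyj
    refine ⟨min j j', by simp [hcast j, hcast j', Nat.cast_min], by omega, ?_, ?_⟩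
    · rcases Nat.le_total j j' with h | h
      · rw [Nat.min_eq_left h]
        obtain ⟨t, ht, hp⟩ := hocc
        exact ⟨t, List.mem_append.mpr (Or.inl ht), hp⟩
      · rw [Nat.min_eq_right h]
        obtain ⟨t, ht, hp⟩ := hocc'
        exact ⟨t, List.mem_append.mpr (Or.inr ht), hp⟩
    · intro i hki hij t ht
      rcases List.mem_append.mp ht with h | h
      · exact hmin i hki (by omega) t h
      · exact hmin' i hki (by omega) t h

theorem TokQ_find (s : String) (t : String) (k : Nat) (hk : k ≤ s.toList.length) :
    TokQ s.toList k [t.toList] (PySem.Str.findFrom s t ↑k none) := by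
  rw [PySem.Str.findFrom_eq]
  by_cases h : PySem.Chars.findFrom s.toList t.toList ↑k none = -1
  · left
    refine ⟨h, ?_⟩
    intro t' ht' j hkj hp
    have ht'' : t' = t.toList := by simpa using ht'
    rw [ht''] at hp
    have hinf : t.toList <:+: List.drop k s.toList := by
      have hdd : List.drop j s.toList = List.drop (j - k) (List.drop k s.toList) := by
        rw [List.drop_drop]; congr 1; omega
      rw [hdd] at hp
      exact hp.isInfix.trans (List.drop_suffix _ _).isInfix
    exact (PySem.Chars.findFrom_natCast_eq_neg_one_iff s.toList t.toList k hk).mp h hinf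
  · right
    obtain ⟨h1, h2, h3⟩ := PySem.Chars.findFrom_natCast_spec s.toList t.toList k hk h
    refine ⟨(PySem.Chars.findFrom s.toList t.toList ↑k none).toNat, ?_, ?_, ?_, ?_⟩
    · rw [Int.toNat_of_nonneg (by omega)]
    · omega
    · exact ⟨t.toList, by simp, h2⟩
    · intro i hki hij t' ht'
      have ht'' : t' = t.toList := by simpa using ht'
      subst ht''
      exact h3 i hki hij

theorem indexOfBr_spec (s : String) (k : Nat) (hk : k ≤ s.toList.length) :
    TokQ s.toList k pvTokens (indexOfBr s ↑k) := by
  have q1 := TokQ_find s "<br>" k hk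
  have q2 := TokQ_find s "<BR>" k hk
  have q3 := TokQ_find s "<li>" k hk
  have q4 := TokQ_find s "<LI>" k hk
  have q5 := TokQ_find s "<tr>" k hk
  have q6 := TokQ_find s "<TR>" k hk
  have c12 := TokQ_comb _ _ _ _ _ _ q1 q2
  have c34 := TokQ_comb _ _ _ _ _ _ q3 q4
  have c56 := TokQ_comb _ _ _ _ _ _ q5 q6
  have c14 := TokQ_comb _ _ _ _ _ _ c12 c34
  have c := TokQ_comb _ _ _ _ _ _ c14 c56
  have hts : ((["<br>".toList] ++ ["<BR>".toList]) ++ (["<li>".toList] ++ ["<LI>".toList])) ++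
      (["<tr>".toList] ++ ["<TR>".toList]) = pvTokens := by decide
  rw [hts] at c
  unfold indexOfBr
  simp only [ne_eq, ite_not]
  exact c

theorem loop_eq (s : String) : ∀ (fuel : Nat) (k : Nat) (r : Int), k ≤ s.toList.length →
    s.toList.length + 1 - k ≤ fuel →
    htmlLoop s (indexOfBr s ↑k) r fuel = r + scanB (s.toList.drop k) := by
  intro fuel
  induction fuel with
  | zero => intro k r hk hf; exact absurd hf (by omega)
  | succ fuel ih =>
    intro k r hk hf
    rcases indexOfBr_spec s k hk with ⟨h1, hno⟩ | ⟨j, hj, hkj, hocc, hmin⟩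
    · rw [h1]
      simp only [htmlLoop, ne_eq, not_true_eq_false, ite_false]
      have hz : scanB (s.toList.drop k) = 0 := scanB_no_match _ (fun i => by
        rw [List.drop_drop, ← Bool.not_eq_true, tokAt_iff]
        rintro ⟨t, ht, hp⟩
        exact hno t ht (k + i) (by omega) hp)
      rw [hz]
      ring
    · rw [hj]
      simp only [htmlLoop]
      rw [if_pos (show (↑j : Int) ≠ -1 by omega)]
      have hlen4 : j + 4 ≤ s.toList.length := by
        obtain ⟨t, ht, hp⟩ := hocc
        have h4 : t.length = 4 := by fin_cases ht <;> rfl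
        have hle := hp.length_le
        rw [List.length_drop] at hle
        omega
      rw [show (↑j : Int) + 4 = ↑(j + 4) by push_cast; ring,
        ih (j + 4) (r + 1) (by omega) (by omega)]
      have hmin' : ∀ i, i < j - k → tokAt ((s.toList.drop k).drop i) = false := fun i hi => by
        rw [List.drop_drop, ← Bool.not_eq_true, tokAt_iff]
        rintro ⟨t, ht, hp⟩
        exact hmin (k + i) (by omega) (by omega) t ht hp
      rw [scanB_first (j - k) _
        (by rw [List.drop_drop, show k + (j - k) = j by omega]; exact (tokAt_iff _).mpr hocc)
        hmin']
      rw [List.drop_drop, show k + (j - k + 4) = j + 4 by omega]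
      ring

-- ===== VERDICT (by name: the statement is the Claim_ definition above) =====
theorem htmlHeight_spec : Claim_equal_htmlHeight := by
  intro s _
  show htmlHeight s = htmlHeight_alt s
  have h := loop_eq s (s.toList.length + 1) 0 1 (Nat.zero_le _) (by omega)
  simp only [Nat.cast_zero, List.drop_zero] at h
  simp only [htmlHeight, htmlHeight_alt, h]
  ring
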